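-- pv_equiv track=rewrite | github.com/yhs3434/Algorithms | baekjun/stage solve/28.DFSandBFS/7576.py | isRightRow
-- ===== SOURCE A (Python) =====
-- def isRightRow(up, down, board):
--     if up == down:
--         if 0 in board[up]:
--             return False
--         else:
--             return True
--
--     mid = (up + down) // 2
--     if not isRightRow(up, mid, board):
--         return False
--     if not isRightRow(mid+1, down, board):
--         return False
--     return True
-- ===== SOURCE B (Python) =====
-- def isRightRow(up, down, board):
--     row = up
--     while 0 not in board[row] and row < down:
--         row += 1
--     return 0 not in board[row]
-- ===== Notes on version B (the rewrite author's own statement) =====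
-- stated objective: simpler
-- what changed: Replaces the divide-and-conquer recursion with a single condition-driven while loop that advances a row cursor while the current row is clean and below down, then returns the membership test of the row it stopped on.
import Mathlib
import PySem

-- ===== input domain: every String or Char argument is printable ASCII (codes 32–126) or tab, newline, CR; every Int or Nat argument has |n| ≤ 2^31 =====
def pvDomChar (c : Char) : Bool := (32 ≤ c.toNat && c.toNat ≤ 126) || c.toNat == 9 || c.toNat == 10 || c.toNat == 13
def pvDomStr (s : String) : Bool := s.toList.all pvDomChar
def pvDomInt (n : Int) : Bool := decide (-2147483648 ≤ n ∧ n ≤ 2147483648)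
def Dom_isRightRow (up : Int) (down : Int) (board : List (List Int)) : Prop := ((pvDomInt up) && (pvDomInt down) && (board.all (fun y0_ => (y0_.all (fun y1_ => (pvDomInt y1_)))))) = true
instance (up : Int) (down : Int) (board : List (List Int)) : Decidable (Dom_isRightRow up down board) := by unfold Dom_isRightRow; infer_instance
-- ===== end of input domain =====

-- B replaces A's divide-and-conquer recursion with one condition-driven while loop over a
-- row cursor (simpler: no midpoint arithmetic, no recursion).

-- ===== PORT A =====
-- A's recursion has no base case for an empty interval (up > down → infinite recursion in
-- Python); the port carries a fuel parameter, which a depth bound shows is never exhausted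
-- on the inputs Pre_ admits.
def isRightRowFuel (fuel : Nat) (up : Int) (down : Int) (board : List (List Int)) : Bool :=
  match fuel with
  | 0 => false
  | fuel + 1 =>
    if up = down then
      match PySem.List.pyGet? board up with
      | none => false  -- IndexError in Python; excluded by Pre_
      | some row => if row.contains 0 then false else true
    else
      let mid := PySem.Int.floordiv (up + down) 2
      if !(isRightRowFuel fuel up mid board) then false
      else if !(isRightRowFuel fuel (mid + 1) down board) then false
      else true

def isRightRow (up : Int) (down : Int) (board : List (List Int)) : Bool :=
  isRightRowFuel ((down - up).toNat + 1) up down board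

-- ===== PORT B =====
-- Source B's while loop; like A's recursion it only terminates normally on a well-formed
-- interval, so the port carries a fuel parameter that suffices on the inputs Pre_ admits.
-- '(pyGet? …).elim false …' : a 'none' cell is an IndexError in Python; excluded by Pre_.
def rowClean (board : List (List Int)) (row : Int) : Bool :=
  (PySem.List.pyGet? board row).elim false (fun r => !(r.contains 0))

def altLoop (fuel : Nat) (row : Int) (down : Int) (board : List (List Int)) : Bool :=
  match fuel with
  | 0 => false
  | fuel + 1 =>
    if rowClean board row && row < down then
      altLoop fuel (row + 1) down board
    else
      rowClean board row

def isRightRow_alt (up : Int) (down : Int) (board : List (List Int)) : Bool :=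
  altLoop ((down - up).toNat + 1) up down board

-- ===== PRECONDITION & SPEC =====
-- Pre_ admits exactly the inputs on which A returns: up ≤ down (on up > down A's recursion
-- never reaches a base case: RecursionError), the first row index in range, and either the
-- whole interval in range or a zero row met before the first out-of-range index (both
-- programs test rows left to right and return False there; past that point an IndexError).
-- The zero-row clause quantifies the index i over the valid positions [-len, len) directly
-- (as i = k - len for k < 2*len), so deciding Pre_ never enumerates the huge range up..down.
def Pre_isRightRow (up : Int) (down : Int) (board : List (List Int)) : Prop :=
  up ≤ down ∧ -(board.length : Int) ≤ up ∧
    (down < (board.length : Int) ∨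
      ∃ k ∈ List.range (2 * board.length),
        up ≤ (k : Int) - (board.length : Int) ∧ (k : Int) - (board.length : Int) ≤ down ∧
          (0 : Int) ∈ (PySem.List.pyGet? board ((k : Int) - (board.length : Int))).getD [])
instance (up : Int) (down : Int) (board : List (List Int)) : Decidable (Pre_isRightRow up down board) := by unfold Pre_isRightRow; infer_instance

def pvWitness_isRightRow : Int × Int × List (List Int) := (0, 1, [[1], [2, 3]])

def Spec_isRightRow (up : Int) (down : Int) (board : List (List Int)) (out : Bool) : Prop := out = isRightRow_alt up down board
instance (up : Int) (down : Int) (board : List (List Int)) (out : Bool) : Decidable (Spec_isRightRow up down board out) := by unfold Spec_isRightRow; infer_instance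

-- ===== CLAIM (what is proved, stated in full; the proofs are below) =====
def Claim_equal_isRightRow : Prop := ∀ (up : Int) (down : Int) (board : List (List Int)), Dom_isRightRow up down board → Pre_isRightRow up down board → Spec_isRightRow up down board (isRightRow up down board)

-- ===== LEMMAS AND PROOFS =====

-- Common characterisation both ports are reduced to: every row with index in [a, b) passes
-- the membership test.
def rowsOk (a : Int) (b : Int) (board : List (List Int)) : Bool :=
  (PySem.List.pyRange a b 1).all (rowClean board)

lemma rowsOk_singleton (i : Int) (board : List (List Int)) :
    rowsOk i (i + 1) board = rowClean board i := by
  simp [rowsOk, PySem.List.pyRange_one_singleton]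

lemma rowsOk_split (a m b : Int) (board : List (List Int)) (h1 : a ≤ m) (h2 : m ≤ b) :
    rowsOk a b board = (rowsOk a m board && rowsOk m b board) := by
  unfold rowsOk
  rw [PySem.List.pyRange_one_append a m b h1 h2, List.all_append]

-- Port A equals rowsOk whenever the fuel exceeds the interval length.
lemma fuel_eq_rowsOk : ∀ (f : Nat) (up down : Int) (board : List (List Int)),
    up ≤ down → (down - up).toNat < f →
    isRightRowFuel f up down board = rowsOk up (down + 1) board := by
  intro f
  induction f with
  | zero => intro up down board _ hf; omega
  | succ f ih =>
    intro up down board hud hf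
    by_cases heq : up = down
    · subst heq
      rw [rowsOk_singleton]
      simp only [isRightRowFuel, if_true, rowClean]
      cases PySem.List.pyGet? board up with
      | none => rfl
      | some row => cases row.contains 0 <;> simp
    · have hlt : up < down := lt_of_le_of_ne hud heq
      have hmid : up ≤ PySem.Int.floordiv (up + down) 2 ∧
          PySem.Int.floordiv (up + down) 2 ≤ down :=
        PySem.Int.floordiv_two_mid_bounds hud
      have hmlt : PySem.Int.floordiv (up + down) 2 < down := by
        rw [PySem.Int.floordiv_lt_iff_lt_mul (by omega)]; omega
      set mid := PySem.Int.floordiv (up + down) 2 with hm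
      have h1 : isRightRowFuel f up mid board = rowsOk up (mid + 1) board :=
        ih up mid board hmid.1 (by omega)
      have h2 : isRightRowFuel f (mid + 1) down board = rowsOk (mid + 1) (down + 1) board :=
        ih (mid + 1) down board (by omega) (by omega)
      rw [rowsOk_split up (mid + 1) (down + 1) board (by omega) (by omega)]
      simp only [isRightRowFuel, if_neg heq, ← hm, h1, h2]
      cases rowsOk up (mid + 1) board <;> cases rowsOk (mid + 1) (down + 1) board <;> rfl

-- Port B's loop equals rowsOk under the same conditions.
lemma altLoop_eq_rowsOk : ∀ (f : Nat) (row down : Int) (board : List (List Int)),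
    row ≤ down → (down - row).toNat < f →
    altLoop f row down board = rowsOk row (down + 1) board := by
  intro f
  induction f with
  | zero => intro row down board _ hf; omega
  | succ f ih =>
    intro row down board hrd hf
    by_cases hlt : row < down
    · rw [show rowsOk row (down + 1) board =
            (rowClean board row && rowsOk (row + 1) (down + 1) board) from by
        unfold rowsOk
        rw [PySem.List.pyRange_one_cons (by omega : row < down + 1)]
        simp [List.all_cons]]
      cases hc : rowClean board row with
      | false => simp [altLoop, hc]
      | true =>
        simp only [altLoop, hc, hlt, decide_true, Bool.and_self, if_true, Bool.true_and]
        exact ih (row + 1) down board (by omega) (by omega)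
    · have heq : row = down := by omega
      subst heq
      rw [rowsOk_singleton]
      simp [altLoop]

-- ===== VERDICT (by name: the statement is the Claim_ definition above) =====
theorem isRightRow_spec : Claim_equal_isRightRow := by
  intro up down board _ hpre
  unfold Spec_isRightRow isRightRow isRightRow_alt
  rw [fuel_eq_rowsOk _ up down board hpre.1 (by omega),
      altLoop_eq_rowsOk _ up down board hpre.1 (by omega)]
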